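-- pv_equiv track=rewrite | github.com/fabrikler/python-mooc-fi-25 | part04-31_all_longest_in_list/src/all_longest_in_list.py | all_the_longest
-- ===== SOURCE A (Python) =====
-- def all_the_longest(my_list: list):
--
--     max_len = 0
--
--     for i in my_list:
--         if len(i) > max_len:
--             max_len = len(i)
--
--     long_list = []
--
--     for i in my_list:
--         if len(i) == max_len:
--             long_list.append(i)
--
--     return long_list
-- ===== SOURCE B (Python) =====
-- def all_the_longest(my_list: list):
--     best_len = 0
--     best = []
--     for i in my_list:
--         if len(i) > best_len:
--             best_len = len(i)
--             best = [i]
--         elif len(i) == best_len: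
--             best.append(i)
--     return best
-- ===== Notes on version B (the rewrite author's own statement) =====
-- stated objective: alternative
-- what changed: Single pass with a (best_len, best_list) accumulator that resets on a new maximum, replacing A's two full passes (one to find the max length, one to filter by it).
import Mathlib
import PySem

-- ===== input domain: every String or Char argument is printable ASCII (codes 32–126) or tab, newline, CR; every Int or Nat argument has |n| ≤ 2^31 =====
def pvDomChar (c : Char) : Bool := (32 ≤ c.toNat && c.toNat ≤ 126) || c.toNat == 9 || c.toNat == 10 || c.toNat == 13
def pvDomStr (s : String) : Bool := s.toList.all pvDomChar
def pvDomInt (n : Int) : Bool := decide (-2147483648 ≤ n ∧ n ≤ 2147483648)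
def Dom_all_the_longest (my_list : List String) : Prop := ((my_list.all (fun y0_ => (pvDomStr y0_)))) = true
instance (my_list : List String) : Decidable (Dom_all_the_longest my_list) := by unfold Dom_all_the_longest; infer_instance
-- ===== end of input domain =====

-- B replaces A's two passes (find max length, then filter) by one pass keeping a
-- (best_len, best_list) accumulator that resets on a new maximum. Objective: alternative (one pass instead of two).

-- ===== PORT A =====
-- first loop: max_len accumulator
def all_the_longest_max (m : Int) (i : String) : Int :=
  if PySem.Str.len i > m then PySem.Str.len i else m

-- second loop: collect elements of maximal length
def all_the_longest (my_list : List String) : List String :=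
  let max_len := my_list.foldl all_the_longest_max 0
  my_list.foldl (fun long_list i =>
    if PySem.Str.len i == max_len then long_list ++ [i] else long_list) []

-- ===== PORT B =====
def all_the_longest_step (st : Int × List String) (i : String) : Int × List String :=
  if PySem.Str.len i > st.1 then (PySem.Str.len i, [i])
  else if PySem.Str.len i == st.1 then (st.1, st.2 ++ [i])
  else st

def all_the_longest_alt (my_list : List String) : List String :=
  (my_list.foldl all_the_longest_step (0, [])).2

-- ===== PRECONDITION & SPEC =====
def Spec_all_the_longest (my_list : List String) (out : List String) : Prop := out = all_the_longest_alt my_list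
instance (my_list : List String) (out : List String) : Decidable (Spec_all_the_longest my_list out) := by unfold Spec_all_the_longest; infer_instance

-- ===== CLAIM (what is proved, stated in full; the proofs are below) =====
def Claim_equal_all_the_longest : Prop := ∀ (my_list : List String), Dom_all_the_longest my_list → Spec_all_the_longest my_list (all_the_longest my_list)

-- ===== LEMMAS AND PROOFS =====

theorem max_le_foldl (m : Int) (l : List String) :
    m ≤ l.foldl all_the_longest_max m := by
  induction l generalizing m with
  | nil => simp [List.foldl]
  | cons i t ih =>
    simp only [List.foldl]
    refine le_trans ?_ (ih (all_the_longest_max m i))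
    unfold all_the_longest_max
    split <;> omega

theorem foldl_filter (l : List String) (M : Int) (acc : List String) :
    l.foldl (fun long_list i =>
      if PySem.Str.len i == M then long_list ++ [i] else long_list) acc
      = acc ++ l.filter (fun i => PySem.Str.len i == M) := by
  induction l generalizing acc with
  | nil => simp [List.foldl]
  | cons i t ih =>
    simp only [List.foldl]
    rw [ih]
    by_cases h : ((i.length : Int)) = M
    · simp [h, List.append_assoc]
    · simp [h]

theorem step_invariant (l : List String) (m : Int) (acc : List String) :
    l.foldl all_the_longest_step (m, acc)
      = (l.foldl all_the_longest_max m,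
         (if l.foldl all_the_longest_max m = m then acc else [])
           ++ l.filter (fun i => PySem.Str.len i == l.foldl all_the_longest_max m)) := by
  induction l generalizing m acc with
  | nil => simp [List.foldl]
  | cons i t ih =>
    have hge : all_the_longest_max m i ≤ t.foldl all_the_longest_max (all_the_longest_max m i) :=
      max_le_foldl _ _
    simp only [List.foldl]
    rcases lt_trichotomy ((i.length : Int)) m with hlt | heq | hgt
    · have hs : all_the_longest_step (m, acc) i = (m, acc) := by
        unfold all_the_longest_step; simp [not_lt.mpr (le_of_lt hlt), ne_of_lt hlt]
      have hm : all_the_longest_max m i = m := by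
        unfold all_the_longest_max; simp [not_lt.mpr (le_of_lt hlt)]
      rw [hm] at hge
      rw [hs, ih]
      simp only [hm]
      have hne : ¬ (((i.length : Int)) = t.foldl all_the_longest_max m) := by omega
      simp [hne]
    · have hs : all_the_longest_step (m, acc) i = (m, acc ++ [i]) := by
        unfold all_the_longest_step; simp [heq]
      have hm : all_the_longest_max m i = m := by
        unfold all_the_longest_max; simp [heq]
      rw [hm] at hge
      rw [hs, ih]
      simp only [hm]
      by_cases hF : t.foldl all_the_longest_max m = m
      · simp [hF, heq, List.append_assoc]
      · have hne : ¬ (((i.length : Int)) = t.foldl all_the_longest_max m) := by omega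
        simp [hF, hne]
    · have hs : all_the_longest_step (m, acc) i = (((i.length : Int)), [i]) := by
        unfold all_the_longest_step; simp [hgt]
      have hm : all_the_longest_max m i = ((i.length : Int)) := by
        unfold all_the_longest_max; simp [hgt]
      rw [hm] at hge
      rw [hs, ih]
      simp only [hm]
      have hFne : ¬ (t.foldl all_the_longest_max ((i.length : Int)) = m) := by omega
      simp only [hFne, if_false, List.filter_cons]
      by_cases hiF : ((i.length : Int)) = t.foldl all_the_longest_max ((i.length : Int))
      · simp [← hiF]
      · simp [hiF, Ne.symm hiF]

-- ===== VERDICT (by name: the statement is the Claim_ definition above) =====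
theorem all_the_longest_spec : Claim_equal_all_the_longest := by
  intro my_list _
  unfold Spec_all_the_longest all_the_longest all_the_longest_alt
  rw [step_invariant, foldl_filter]
  simp
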